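-- pv_equiv track=rewrite | github.com/miliar/Code_Jam_Webscraper | solutions_python/solutions_year11_round0_nr3/555.py | solve
-- ===== SOURCE A (Python) =====
-- from itertools import combinations
-- from copy import copy
--
-- def xor_list(a):
-- 	j = 0
-- 	for i in a:
-- 		j ^= int(i)
-- 	return j
--
-- def diff_list(a, b):
-- 	c = copy(b)
-- 	for i in a:
-- 		c.remove(i)
-- 	return c
--
-- def solve(test_case):
-- 	#print test_case
-- 	valid_list = []
-- 	for i in range(1, len(test_case)):
-- 		for k in combinations(test_case, i):
-- 			if int(xor_list(k)) == int(xor_list(diff_list(k, test_case))):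
-- 				#print 'WAT'
-- 				valid_list.append(sum(int(j) for j in k))
-- 			#print k, diff_list(k, test_case), xor_list(k), xor_list(diff_list(k, test_case))
-- 	if len(valid_list) == 0:
-- 		return 'NO'
-- 	return str(max(valid_list))
-- ===== SOURCE B (Python) =====
-- def solve(test_case):
--     # O(n): a split into two equal-XOR nonempty halves exists iff the total XOR
--     # is 0 (and there are at least 2 elements); then every proper nonempty
--     # subset is valid, so take the best proper nonempty subset sum directly.
--     n = len(test_case)
--     if n < 2:
--         return 'NO'
--     t = 0
--     for x in test_case:
--         t ^= x
--     if t != 0: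
--         return 'NO'
--     if all(x <= 0 for x in test_case):
--         best = max(test_case)
--     elif all(x > 0 for x in test_case):
--         best = sum(test_case) - min(test_case)
--     else:
--         best = sum(x for x in test_case if x > 0)
--     return str(best)
-- ===== Notes on version B (the rewrite author's own statement) =====
-- stated objective: faster
-- what changed: A enumerates all 2^n subsets (each with a quadratic remove-based complement and XOR scans) to find the best equal-XOR split; B uses the closed form: a split exists iff n >= 2 and the total XOR is 0, and then the best proper nonempty subset sum is computed directly by a sign case analysis (all nonpositive: max element; all positive: total minus min; mixed: sum of positives).
import Mathlib
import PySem

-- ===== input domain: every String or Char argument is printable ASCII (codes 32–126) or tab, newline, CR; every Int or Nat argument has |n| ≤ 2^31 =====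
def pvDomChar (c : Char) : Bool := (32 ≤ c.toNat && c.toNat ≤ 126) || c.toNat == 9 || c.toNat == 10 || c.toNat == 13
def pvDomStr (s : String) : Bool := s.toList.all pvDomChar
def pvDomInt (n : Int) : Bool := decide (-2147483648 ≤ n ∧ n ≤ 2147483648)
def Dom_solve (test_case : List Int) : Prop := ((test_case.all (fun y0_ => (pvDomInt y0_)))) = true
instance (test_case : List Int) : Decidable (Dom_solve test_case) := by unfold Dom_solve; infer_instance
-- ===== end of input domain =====

-- B replaces A's exponential scan of all subsets by the O(n) closed form:
-- a valid split exists iff n ≥ 2 and the total XOR is 0, and then the answer is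
-- the best proper nonempty subset sum (cases on the signs of the elements).

-- ===== PORT A =====
-- xor_list(a): j = 0; for i in a: j ^= int(i)
def xorList (a : List Int) : Int := a.foldl (fun j i => PySem.Int.bxor j i) 0

-- diff_list(a, b): c = copy(b); for i in a: c.remove(i)  (remove = erase first occurrence)
def diffList (a b : List Int) : List Int := a.foldl (fun c i => c.erase i) b

-- the valid_list accumulator of solve; itertools.combinations(tc, i) ported as
-- List.sublistsLen i tc (the same collection of length-i subsequences)
def validList (test_case : List Int) : List Int :=
  (PySem.List.pyRange 1 (test_case.length : Int) 1).foldl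
    (fun acc i =>
      acc ++ ((List.sublistsLen i.toNat test_case).filter
          (fun k => xorList k == xorList (diffList k test_case))).map (fun k => k.sum)) []

def solve (test_case : List Int) : String :=
  let valid := validList test_case
  if valid.length = 0 then "NO"
  else
    match PySem.List.max? valid (fun x => x) with
    | some m => PySem.Int.toStr m
    | none => "NO"   -- unreachable totalization guard (valid ≠ [])

-- ===== PORT B =====
def solve_alt (test_case : List Int) : String :=
  if test_case.length < 2 then "NO"
  else
    let t := test_case.foldl (fun a x => PySem.Int.bxor a x) 0
    if t ≠ 0 then "NO"
    else
      let best : Int :=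
        if test_case.all (fun x => decide (x ≤ 0)) then
          (PySem.List.max? test_case (fun x => x)).getD 0
        else if test_case.all (fun x => decide (0 < x)) then
          test_case.sum - (PySem.List.min? test_case (fun x => x)).getD 0
        else (test_case.filter (fun x => decide (0 < x))).sum
      PySem.Int.toStr best

-- ===== PRECONDITION & SPEC =====
def Spec_solve (test_case : List Int) (out : String) : Prop := out = solve_alt test_case
instance (test_case : List Int) (out : String) : Decidable (Spec_solve test_case out) := by unfold Spec_solve; infer_instance

-- ===== CLAIM (what is proved, stated in full; the proofs are below) =====
def Claim_equal_solve : Prop := ∀ (test_case : List Int), Dom_solve test_case → Spec_solve test_case (solve test_case)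

-- ===== LEMMAS AND PROOFS =====

-- two's-complement encoding of an Int: sign flag + magnitude bits
def pvEnc (s : Bool) (m : Nat) : Int := if s then -(m : Int) - 1 else (m : Int)

theorem pvEnc_surj (a : Int) : ∃ s m, a = pvEnc s m := by
  by_cases h : 0 ≤ a
  · exact ⟨false, a.toNat, by simp [pvEnc]; omega⟩
  · exact ⟨true, (-a - 1).toNat, by simp [pvEnc]; omega⟩

theorem bxor_enc (s1 s2 : Bool) (m1 m2 : Nat) :
    PySem.Int.bxor (pvEnc s1 m1) (pvEnc s2 m2) = pvEnc (s1 != s2) (m1 ^^^ m2) := by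
  have hnn : ∀ m : Nat, (0 : Int) ≤ (m : Int) := fun m => Int.natCast_nonneg m
  have hneg : ∀ m : Nat, ¬ (0 : Int) ≤ -(m : Int) - 1 := fun m => by have := hnn m; omega
  have e2 : ∀ m : Nat, -(-(m : Int) - 1) - 1 = (m : Int) := fun m => by ring
  have ht1 : ∀ m : Nat, ((m : Int)).toNat = m := fun m => Int.toNat_natCast m
  cases s1 <;> cases s2
  case false.false =>
    show PySem.Int.bxor (m1 : Int) (m2 : Int) = ((m1 ^^^ m2 : Nat) : Int)
    simp
  case false.true =>
    show PySem.Int.bxor (m1 : Int) (-(m2 : Int) - 1) = -((m1 ^^^ m2 : Nat) : Int) - 1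
    simp only [PySem.Int.bxor]
    rw [if_pos (hnn m1), if_neg (hneg m2), e2, ht1, ht1]
  case true.false =>
    show PySem.Int.bxor (-(m1 : Int) - 1) (m2 : Int) = -((m1 ^^^ m2 : Nat) : Int) - 1
    simp only [PySem.Int.bxor]
    rw [if_neg (hneg m1), if_pos (hnn m2), e2, ht1, ht1]
  case true.true =>
    show PySem.Int.bxor (-(m1 : Int) - 1) (-(m2 : Int) - 1) = ((m1 ^^^ m2 : Nat) : Int)
    simp only [PySem.Int.bxor]
    rw [if_neg (hneg m1), if_neg (hneg m2), e2, e2, ht1, ht1]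

theorem bxor_assoc (a b c : Int) :
    PySem.Int.bxor (PySem.Int.bxor a b) c = PySem.Int.bxor a (PySem.Int.bxor b c) := by
  obtain ⟨sa, ma, rfl⟩ := pvEnc_surj a
  obtain ⟨sb, mb, rfl⟩ := pvEnc_surj b
  obtain ⟨sc, mc, rfl⟩ := pvEnc_surj c
  rw [bxor_enc, bxor_enc, bxor_enc, bxor_enc, Nat.xor_assoc]
  cases sa <;> cases sb <;> cases sc <;> rfl

theorem zero_bxor (a : Int) : PySem.Int.bxor 0 a = a := by
  rw [PySem.Int.bxor_comm]; exact PySem.Int.bxor_zero a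

theorem bxor_left_cancel (x y : Int) : PySem.Int.bxor x (PySem.Int.bxor x y) = y := by
  rw [← bxor_assoc, PySem.Int.bxor_self, zero_bxor]

theorem foldl_bxor_eq (l : List Int) : ∀ j : Int,
    l.foldl (fun a x => PySem.Int.bxor a x) j = PySem.Int.bxor j (xorList l) := by
  induction l with
  | nil =>
      intro j
      rw [List.foldl_nil, show xorList [] = 0 from rfl, PySem.Int.bxor_zero]
  | cons a l ih =>
      intro j
      rw [List.foldl_cons, ih,
        show xorList (a :: l)
            = l.foldl (fun j i => PySem.Int.bxor j i) (PySem.Int.bxor 0 a) from rfl,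
        ih, zero_bxor, bxor_assoc]

theorem xorList_append (s t : List Int) :
    xorList (s ++ t) = PySem.Int.bxor (xorList s) (xorList t) := by
  unfold xorList
  rw [List.foldl_append, foldl_bxor_eq]
  rfl

theorem xorList_perm {l l' : List Int} (h : l.Perm l') : xorList l = xorList l' := by
  unfold xorList
  exact @List.Perm.foldl_eq _ _ _ _ _
    ⟨fun b a1 a2 => by rw [bxor_assoc, bxor_assoc, PySem.Int.bxor_comm a1 a2]⟩ h 0

theorem subperm_cons_elim {a : Int} {k l : List Int} (h : (a :: k).Subperm l) :
    a ∈ l ∧ k.Subperm (l.erase a) := by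
  refine ⟨h.subset (List.mem_cons_self), List.subperm_ext_iff.mpr ?_⟩
  intro x hx
  have h1 := List.subperm_ext_iff.mp h x (List.mem_cons_of_mem a hx)
  rw [List.count_erase]
  rw [List.count_cons] at h1
  by_cases hax : a = x <;> simp [hax] at h1 ⊢ <;> omega

theorem diffList_cons (a : Int) (k l : List Int) :
    diffList (a :: k) l = diffList k (l.erase a) := by
  simp [diffList]

theorem diff_perm : ∀ (k l : List Int), k.Subperm l → (k ++ diffList k l).Perm l := by
  intro k
  induction k with
  | nil => intro l _; simp [diffList]
  | cons a k ih =>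
      intro l h
      obtain ⟨ha, hk⟩ := subperm_cons_elim h
      rw [diffList_cons, List.cons_append]
      exact ((ih (l.erase a) hk).cons a).trans (List.perm_cons_erase ha).symm

theorem diff_xor {k l : List Int} (h : k.Subperm l) :
    xorList (diffList k l) = PySem.Int.bxor (xorList k) (xorList l) := by
  have := xorList_perm (diff_perm k l h)
  rw [xorList_append] at this
  rw [← this, bxor_left_cancel]

theorem diff_sum {k l : List Int} (h : k.Subperm l) :
    k.sum + (diffList k l).sum = l.sum := by
  have := (diff_perm k l h).sum_eq
  simpa using this

theorem diff_length {k l : List Int} (h : k.Subperm l) :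
    k.length + (diffList k l).length = l.length := by
  have := (diff_perm k l h).length_eq
  simpa using this

theorem diff_subset {k l : List Int} (h : k.Subperm l) :
    ∀ x ∈ diffList k l, x ∈ l := by
  intro x hx
  exact ((diff_perm k l h).mem_iff).mp (List.mem_append_right k hx)

theorem sum_nonpos_list : ∀ (l : List Int), (∀ x ∈ l, x ≤ 0) → l.sum ≤ 0 := by
  intro l
  induction l with
  | nil => simp
  | cons a l ih =>
      intro h
      simp only [List.sum_cons]
      have := ih (fun x hx => h x (List.mem_cons_of_mem a hx))
      have := h a List.mem_cons_self
      omega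

theorem sum_le_filter_pos : ∀ (l : List Int),
    l.sum ≤ (l.filter (fun x => decide (0 < x))).sum := by
  intro l
  induction l with
  | nil => simp
  | cons a l ih =>
      by_cases h : 0 < a <;> simp [h] <;> omega

theorem sublist_sum_le {s t : List Int} (h : s.Sublist t) (ht : ∀ x ∈ t, 0 ≤ x) :
    s.sum ≤ t.sum := by
  induction h with
  | slnil => simp
  | cons a h ih =>
      rename_i t'
      have := ih (fun x hx => ht x (List.mem_cons_of_mem a hx))
      have := ht a List.mem_cons_self
      simp only [List.sum_cons]; omega
  | cons₂ a h ih =>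
      have := ih (fun x hx => ht x (List.mem_cons_of_mem a hx))
      simp only [List.sum_cons]; omega

theorem validList_eq (tc : List Int) :
    validList tc = (PySem.List.pyRange 1 (tc.length : Int) 1).flatMap
      (fun i => ((List.sublistsLen i.toNat tc).filter
          (fun k => xorList k == xorList (diffList k tc))).map (fun k => k.sum)) := by
  unfold validList
  rw [PySem.List.foldl_append_eq_flatMap]
  rfl

theorem mem_validList {tc : List Int} {s : Int} :
    s ∈ validList tc ↔ ∃ k : List Int, k.Sublist tc ∧ 1 ≤ k.length ∧
      k.length < tc.length ∧ (xorList k == xorList (diffList k tc)) = true ∧ k.sum = s := by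
  rw [validList_eq, List.mem_flatMap]
  constructor
  · rintro ⟨i, hi, hmem⟩
    obtain ⟨hi1, hi2⟩ := PySem.List.mem_pyRange_one.mp hi
    obtain ⟨k, hk, hsum⟩ := List.mem_map.mp hmem
    obtain ⟨hk1, hcond⟩ := List.mem_filter.mp hk
    obtain ⟨hsub, hlen⟩ := List.mem_sublistsLen.mp hk1
    refine ⟨k, hsub, ?_, ?_, hcond, hsum⟩ <;> omega
  · rintro ⟨k, hsub, h1, h2, hcond, hsum⟩
    refine ⟨(k.length : Int), PySem.List.mem_pyRange_one.mpr ⟨by omega, by omega⟩, ?_⟩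
    exact List.mem_map.mpr ⟨k, List.mem_filter.mpr
      ⟨List.mem_sublistsLen.mpr ⟨hsub, by omega⟩, hcond⟩, hsum⟩

theorem cond_true_of_xor_zero {tc k : List Int} (h : k.Sublist tc) (ht : xorList tc = 0) :
    (xorList k == xorList (diffList k tc)) = true := by
  rw [diff_xor h.subperm, ht, PySem.Int.bxor_zero]
  exact beq_self_eq_true _

theorem cond_false_of_xor_ne {tc k : List Int} (h : k.Sublist tc) (ht : xorList tc ≠ 0) :
    ¬ (xorList k == xorList (diffList k tc)) = true := by
  rw [beq_iff_eq, diff_xor h.subperm]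
  intro heq
  apply ht
  have := congrArg (fun z => PySem.Int.bxor (xorList k) z) heq
  simpa [PySem.Int.bxor_self, bxor_left_cancel] using this.symm

theorem solve_eq (tc : List Int) : solve tc = solve_alt tc := by
  by_cases hn : tc.length < 2
  · have hle : ((tc.length : Int)) ≤ 1 := by omega
    have hnil : validList tc = [] := by
      rw [validList_eq, PySem.List.pyRange_one_eq_nil hle]
      rfl
    simp [solve, solve_alt, hnil, hn]
  · push Not at hn
    by_cases ht : xorList tc = 0
    case neg =>
      have hnil : validList tc = [] := by
        rw [validList_eq, List.flatMap_eq_nil_iff]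
        intro i _
        rw [List.map_eq_nil_iff, List.filter_eq_nil_iff]
        intro k hk
        exact cond_false_of_xor_ne (List.mem_sublistsLen.mp hk).1 ht
      have halt : tc.foldl (fun a x => PySem.Int.bxor a x) 0 ≠ 0 := ht
      simp [solve, solve_alt, hnil, halt, Nat.not_lt.mpr hn]
    case pos =>
      have htne : tc ≠ [] := by intro h; rw [h] at hn; simp at hn
      set best : Int :=
        (if tc.all (fun x => decide (x ≤ 0)) then
          (PySem.List.max? tc (fun x => x)).getD 0
        else if tc.all (fun x => decide (0 < x)) then
          tc.sum - (PySem.List.min? tc (fun x => x)).getD 0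
        else (tc.filter (fun x => decide (0 < x))).sum) with hbest
      have hkey : best ∈ validList tc ∧ ∀ s ∈ validList tc, s ≤ best := by
        by_cases hA : tc.all (fun x => decide (x ≤ 0))
        · -- all elements ≤ 0 : best = max element
          have hall : ∀ x ∈ tc, x ≤ 0 := by
            intro x hx; simpa using List.all_eq_true.mp hA x hx
          obtain ⟨M, hM⟩ : ∃ M, PySem.List.max? tc (fun x => x) = some M := by
            cases h : PySem.List.max? tc (fun x => x)
            · exact absurd ((PySem.List.max?_eq_none_iff _ _).mp h) htne
            · exact ⟨_, rfl⟩
          have hMmem := PySem.List.max?_mem hM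
          have hMmax := PySem.List.max?_isMax hM
          have hb : best = M := by rw [hbest, if_pos hA, hM]; rfl
          constructor
          · rw [hb]
            exact mem_validList.mpr ⟨[M], List.singleton_sublist.mpr hMmem, by simp,
              by simp only [List.length_cons, List.length_nil]; omega, cond_true_of_xor_zero (List.singleton_sublist.mpr hMmem) ht,
              by simp⟩
          · intro s hs
            obtain ⟨k, hsub, h1, _, _, rfl⟩ := mem_validList.mp hs
            have hk0 : k ≠ [] := List.ne_nil_of_length_pos (by omega)
            obtain ⟨c, rest, rfl⟩ := List.exists_cons_of_ne_nil hk0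
            have hc : c ≤ M := hMmax c (hsub.subset List.mem_cons_self)
            have hr : rest.sum ≤ 0 := sum_nonpos_list rest
              (fun x hx => hall x (hsub.subset (List.mem_cons_of_mem _ hx)))
            rw [hb]
            simp only [List.sum_cons]
            omega
        · by_cases hB : tc.all (fun x => decide (0 < x))
          · -- all elements > 0 : best = total sum minus min element
            have hall : ∀ x ∈ tc, 0 < x := by
              intro x hx; simpa using List.all_eq_true.mp hB x hx
            obtain ⟨mn, hmn⟩ : ∃ m, PySem.List.min? tc (fun x => x) = some m := by
              cases h : PySem.List.min? tc (fun x => x)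
              · exact absurd ((PySem.List.min?_eq_none_iff _ _).mp h) htne
              · exact ⟨_, rfl⟩
            have hmmem := PySem.List.min?_mem hmn
            have hmmin := PySem.List.min?_isMin hmn
            have hb : best = tc.sum - mn := by rw [hbest, if_neg hA, if_pos hB, hmn]; rfl
            have hperm := List.perm_cons_erase hmmem
            have hesum : (tc.erase mn).sum = tc.sum - mn := by
              have := hperm.sum_eq
              simp only [List.sum_cons] at this
              omega
            constructor
            · rw [hb, ← hesum]
              have hel := List.length_erase_of_mem hmmem
              exact mem_validList.mpr ⟨tc.erase mn, List.erase_sublist, by omega, by omega,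
                cond_true_of_xor_zero List.erase_sublist ht, rfl⟩
            · intro s hs
              obtain ⟨k, hsub, h1, hlt, _, rfl⟩ := mem_validList.mp hs
              have hsp := hsub.subperm
              have hsum := diff_sum hsp
              have hlen := diff_length hsp
              have hd : diffList k tc ≠ [] := by
                intro h; rw [h] at hlen; simp at hlen; omega
              obtain ⟨c, rest, hd'⟩ := List.exists_cons_of_ne_nil hd
              rw [hd'] at hsum
              have hc : mn ≤ c := hmmin c (diff_subset hsp c (hd' ▸ List.mem_cons_self))
              have hr : (0:Int) ≤ rest.sum := List.sum_nonneg
                (fun x hx => le_of_lt (hall x (diff_subset hsp x (hd' ▸ List.mem_cons_of_mem _ hx))))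
              rw [hb]
              simp only [List.sum_cons] at hsum
              omega
          · -- mixed signs : best = sum of the positive elements
            obtain ⟨p, hpmem, hppos⟩ : ∃ x ∈ tc, 0 < x := by
              rcases List.all_eq_true.not.mp hA with h
              push Not at h
              obtain ⟨x, hx, hx'⟩ := h
              exact ⟨x, hx, by simpa using hx'⟩
            obtain ⟨q, hqmem, hqnp⟩ : ∃ x ∈ tc, x ≤ 0 := by
              rcases List.all_eq_true.not.mp hB with h
              push Not at h
              obtain ⟨x, hx, hx'⟩ := h
              exact ⟨x, hx, by simpa using hx'⟩
            have hb : best = (tc.filter (fun x => decide (0 < x))).sum := by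
              rw [hbest, if_neg hA, if_neg hB]
            have hpf : p ∈ tc.filter (fun x => decide (0 < x)) :=
              List.mem_filter.mpr ⟨hpmem, by simpa using hppos⟩
            constructor
            · rw [hb]
              refine mem_validList.mpr ⟨tc.filter (fun x => decide (0 < x)),
                List.filter_sublist, ?_, ?_,
                cond_true_of_xor_zero List.filter_sublist ht, rfl⟩
              · have := List.ne_nil_of_mem hpf
                cases h : tc.filter (fun x => decide (0 < x)) with
                | nil => exact absurd h this
                | cons a l => simp
              · exact List.length_filter_lt_length_iff_exists.mpr
                  ⟨q, hqmem, by simpa using hqnp⟩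
            · intro s hs
              obtain ⟨k, hsub, _, _, _, rfl⟩ := mem_validList.mp hs
              calc k.sum ≤ (k.filter (fun x => decide (0 < x))).sum := sum_le_filter_pos k
                _ ≤ (tc.filter (fun x => decide (0 < x))).sum := by
                    refine sublist_sum_le (hsub.filter _) (fun x hx => ?_)
                    have := (List.mem_filter.mp hx).2
                    simp at this
                    omega
                _ = best := hb.symm
      obtain ⟨hmem, hub⟩ := hkey
      have hne : validList tc ≠ [] := List.ne_nil_of_mem hmem
      obtain ⟨m, hm⟩ : ∃ m, PySem.List.max? (validList tc) (fun x => x) = some m := by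
        cases h : PySem.List.max? (validList tc) (fun x => x)
        · exact absurd ((PySem.List.max?_eq_none_iff _ _).mp h) hne
        · exact ⟨_, rfl⟩
      have hbm : m = best :=
        le_antisymm (hub m (PySem.List.max?_mem hm)) (PySem.List.max?_isMax hm best hmem)
      have halt : tc.foldl (fun a x => PySem.Int.bxor a x) 0 = 0 := ht
      simp only [solve, solve_alt]
      rw [if_neg (by simp only [List.length_eq_zero_iff]; exact hne), hm,
        if_neg (by omega : ¬ tc.length < 2), if_neg (not_not_intro halt), hbm, ← hbest]

-- ===== VERDICT (by name: the statement is the Claim_ definition above) =====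
theorem solve_spec : Claim_equal_solve := by
  intro tc _
  exact solve_eq tc
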